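-- pv_equiv track=rewrite | github.com/HudsonPryde/leetcode-daily | 2024-09/kaitenzushi.py | getMaximumEatenDishCount
-- ===== SOURCE A (Python) =====
-- from typing import List
-- from collections import defaultdict, deque
--
-- def getMaximumEatenDishCount(N: int, D: List[int], K: int) -> int:
--   # Write your code here
--     order = deque([])
--     prev = defaultdict(int)
--     res = 0
--     for d in D:
--         if not prev.get(d, 0):
--             res += 1
--             order.append(d)
--             prev[d] += 1
--         if len(order) > K:
--             o = order.popleft()
--             prev[o] -= 1
--     return res
-- ===== SOURCE B (Python) =====
-- def getMaximumEatenDishCount(N, D, K):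
--     # last[d] = eaten-rank at which dish d was last eaten; eat iff never eaten
--     # or at least K dishes were eaten since.
--     last = {}
--     res = 0
--     for d in D:
--         r = last.get(d)
--         if r is None or res - r >= K:
--             res += 1
--             last[d] = res
--     return res
-- ===== Notes on version B (the rewrite author's own statement) =====
-- stated objective: simpler
-- what changed: Replaces the deque-window plus membership-count dict with a single dict of last-eaten ranks and an arithmetic window test (res - last[d] >= K), removing the popleft/decrement bookkeeping.
import Mathlib
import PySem

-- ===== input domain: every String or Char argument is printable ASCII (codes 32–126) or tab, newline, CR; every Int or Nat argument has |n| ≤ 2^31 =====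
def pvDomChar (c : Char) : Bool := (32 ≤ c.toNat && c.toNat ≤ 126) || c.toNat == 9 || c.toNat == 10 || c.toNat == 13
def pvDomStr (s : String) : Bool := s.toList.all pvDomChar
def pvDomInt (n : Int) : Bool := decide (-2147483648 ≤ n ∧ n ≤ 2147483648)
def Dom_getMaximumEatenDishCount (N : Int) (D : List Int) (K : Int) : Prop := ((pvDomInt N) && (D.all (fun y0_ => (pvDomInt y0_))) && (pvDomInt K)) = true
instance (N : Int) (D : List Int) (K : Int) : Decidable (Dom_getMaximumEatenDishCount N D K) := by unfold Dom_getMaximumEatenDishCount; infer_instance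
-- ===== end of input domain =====

-- B replaces A's deque sliding window + membership-count dict with a single dict of
-- last-eaten ranks and the arithmetic test res - last[d] >= K (objective: simpler).

-- ===== PORT A =====
-- loop body of A: eat if prev.get(d, 0) is falsy; then trim the deque if longer than K
def aTrim (K : Int) (t : List Int × PySem.Dict Int Int × Int) :
    List Int × PySem.Dict Int Int × Int :=
  if (t.1.length : Int) > K then
    match t.1 with
    | o :: rest => (rest, t.2.1.modify o 0 (· - 1), t.2.2)
    | [] => t  -- unreachable: the deque is provably nonempty when popleft runs
  else t

def aStep (K : Int) (s : List Int × PySem.Dict Int Int × Int) (d : Int) :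
    List Int × PySem.Dict Int Int × Int :=
  aTrim K
    (if s.2.1.getD d 0 == 0 then (s.1 ++ [d], s.2.1.modify d 0 (· + 1), s.2.2 + 1)
     else s)

def getMaximumEatenDishCount (N : Int) (D : List Int) (K : Int) : Int :=
  (D.foldl (aStep K) ([], PySem.Dict.empty, 0)).2.2

-- ===== PORT B =====
-- loop body of B: eat iff never eaten, or at least K dishes eaten since d's last rank
def bStep (K : Int) (s : PySem.Dict Int Int × Int) (d : Int) : PySem.Dict Int Int × Int :=
  match s.1.get? d with
  | none => (s.1.insert d (s.2 + 1), s.2 + 1)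
  | some r => if s.2 - r ≥ K then (s.1.insert d (s.2 + 1), s.2 + 1) else s

def getMaximumEatenDishCount_alt (N : Int) (D : List Int) (K : Int) : Int :=
  (D.foldl (bStep K) (PySem.Dict.empty, 0)).2

-- ===== PRECONDITION & SPEC =====
def Spec_getMaximumEatenDishCount (N : Int) (D : List Int) (K : Int) (out : Int) : Prop := out = getMaximumEatenDishCount_alt N D K
instance (N : Int) (D : List Int) (K : Int) (out : Int) : Decidable (Spec_getMaximumEatenDishCount N D K out) := by unfold Spec_getMaximumEatenDishCount; infer_instance

-- ===== CLAIM (what is proved, stated in full; the proofs are below) =====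
def Claim_equal_getMaximumEatenDishCount : Prop := ∀ (N : Int) (D : List Int) (K : Int), Dom_getMaximumEatenDishCount N D K → Spec_getMaximumEatenDishCount N D K (getMaximumEatenDishCount N D K)

-- ===== LEMMAS AND PROOFS =====

-- Invariant tying A's state (order, prev, res) to B's state (last, res):
-- prev counts membership in the deque; the deque holds the (at most max K 0) most
-- recently eaten dishes, whose last-eaten ranks are the consecutive integers
-- res - order.length + 1 .. res in deque order; any dish not in the deque that was
-- eaten at some rank r has res - r ≥ K and r ≤ res.
def WinInv (K : Int) (order : List Int) (prev : PySem.Dict Int Int) (res : Int)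
    (last : PySem.Dict Int Int) : Prop :=
  (∀ x, prev.getD x 0 = if x ∈ order then 1 else 0) ∧
  order.Nodup ∧
  ((order.length : Int) ≤ max K 0) ∧
  (∀ i (h : i < order.length), last.get? order[i] = some (res - order.length + 1 + i)) ∧
  (∀ x r, x ∉ order → last.get? x = some r → K ≤ res - r ∧ r ≤ res)

lemma aTrim_of_le (K : Int) (t : List Int × PySem.Dict Int Int × Int)
    (h : ¬ ((t.1.length : Int) > K)) : aTrim K t = t := by
  unfold aTrim; rw [if_neg h]

lemma aTrim_cons (K : Int) (o : Int) (l : List Int) (p : PySem.Dict Int Int) (r : Int)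
    (h : (((o :: l).length : Int) > K)) :
    aTrim K (o :: l, p, r) = (l, p.modify o 0 (· - 1), r) := by
  unfold aTrim; rw [if_pos h]

lemma aStep_eat (K d : Int) (order : List Int) (prev : PySem.Dict Int Int) (res : Int)
    (h : prev.getD d 0 = 0) :
    aStep K (order, prev, res) d
      = aTrim K (order ++ [d], prev.modify d 0 (· + 1), res + 1) := by
  unfold aStep; rw [if_pos (by simp [h])]

lemma aStep_skip (K d : Int) (order : List Int) (prev : PySem.Dict Int Int) (res : Int)
    (h : prev.getD d 0 ≠ 0) :
    aStep K (order, prev, res) d = aTrim K (order, prev, res) := by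
  unfold aStep; rw [if_neg (by simpa using h)]

lemma step_inv (K d : Int) (order : List Int) (prev : PySem.Dict Int Int) (res : Int)
    (last : PySem.Dict Int Int) (h : WinInv K order prev res last) :
    (aStep K (order, prev, res) d).2.2 = (bStep K (last, res) d).2 ∧
    WinInv K (aStep K (order, prev, res) d).1 (aStep K (order, prev, res) d).2.1
      (bStep K (last, res) d).2 (bStep K (last, res) d).1 := by
  obtain ⟨h1, h2, h3, h4, h5⟩ := h
  by_cases hd : d ∈ order
  · -- d is in the window: neither A nor B eats, and A does not trim
    have hlen1 : 1 ≤ (order.length : Int) := by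
      have := List.length_pos_of_mem hd; omega
    have hprevd : prev.getD d 0 = 1 := by rw [h1]; simp [hd]
    obtain ⟨i, hi, hgi⟩ := List.getElem_of_mem hd
    have hlast : last.get? d = some (res - order.length + 1 + i) := by
      rw [← hgi]; exact h4 i hi
    have hne : ¬ (res - (res - (order.length : Int) + 1 + (i : Int)) ≥ K) := by omega
    have hA : aStep K (order, prev, res) d = (order, prev, res) := by
      rw [aStep_skip K d order prev res (by rw [hprevd]; omega)]
      exact aTrim_of_le K _ (by dsimp only; omega)
    have hB : bStep K (last, res) d = (last, res) := by
      simp only [bStep, hlast]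
      simp [hne]
    rw [hA, hB]
    exact ⟨rfl, h1, h2, h3, h4, h5⟩
  · -- d is not in the window: both eat
    have hprevd : prev.getD d 0 = 0 := by rw [h1]; simp [hd]
    have hB : bStep K (last, res) d = (last.insert d (res + 1), res + 1) := by
      cases hb : last.get? d with
      | none => simp [bStep, hb]
      | some r =>
        have := h5 d r hd hb
        simp [bStep, hb, show res - r ≥ K by omega]
    rw [hB, aStep_eat K d order prev res hprevd]
    by_cases htrim : ((order.length : Int) + 1 > K)
    · -- eat then popleft
      cases order with
      | nil =>
        have hA : aTrim K (([] : List Int) ++ [d], prev.modify d 0 (· + 1), res + 1)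
            = ([], (prev.modify d 0 (· + 1)).modify d 0 (· - 1), res + 1) := by
          simp only [List.nil_append]
          exact aTrim_cons K d [] _ _ (by simp at htrim ⊢; omega)
        rw [hA]
        dsimp only
        refine ⟨rfl, ?_, by simp, by simp [le_max_right], by simp, ?_⟩
        · intro x
          by_cases hx : x = d
          · subst hx; simp [hprevd]
          · simp [PySem.Dict.getD_modify, hx, h1]
        · intro x r _ hx
          by_cases hxd : x = d
          · subst hxd
            rw [PySem.Dict.get?_insert_self] at hx
            have hv : res + 1 = r := by injection hx
            have hK0 : K < 1 := by simpa using htrim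
            omega
          · rw [PySem.Dict.get?_insert_of_ne _ _ hxd] at hx
            have := h5 x r (by simp) hx
            omega
      | cons o tl =>
        have hod : o ≠ d := fun e => hd (e ▸ List.mem_cons_self)
        have hnd : (o :: tl).Nodup := h2
        have hotl : o ∉ tl := (List.nodup_cons.mp hnd).1
        have htl : tl.Nodup := (List.nodup_cons.mp hnd).2
        have hdtl : d ∉ tl := fun e => hd (List.mem_cons_of_mem o e)
        have hA : aTrim K ((o :: tl) ++ [d], prev.modify d 0 (· + 1), res + 1)
            = (tl ++ [d], (prev.modify d 0 (· + 1)).modify o 0 (· - 1), res + 1) := by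
          rw [List.cons_append]
          exact aTrim_cons K o (tl ++ [d]) _ _
            (by simp only [List.length_cons, List.length_append, List.length_nil] at htrim ⊢
                push_cast at htrim ⊢; omega)
        rw [hA]
        dsimp only
        simp only [List.length_cons] at htrim
        refine ⟨rfl, ?_, ?_, ?_, ?_, ?_⟩
        · intro x
          simp only [PySem.Dict.getD_modify]
          by_cases hxo : x = o
          · subst hxo
            have hx1 : prev.getD x 0 = 1 := by rw [h1]; simp
            simp [hod, hx1, hotl]
          · by_cases hxd : x = d
            · subst hxd
              simp [hxo, hprevd, fun e => hd (List.mem_cons_of_mem o e)]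
            · have hx1 := h1 x
              simp only [List.mem_cons, hxo, false_or] at hx1
              simp [hxo, hxd, hx1]
        · simp only [List.nodup_append, htl, List.nodup_cons, List.not_mem_nil,
            not_false_eq_true, List.nodup_nil, and_self, true_and]
          intro a ha b hb
          simp only [List.mem_singleton] at hb
          subst hb
          exact fun e => hdtl (e ▸ ha)
        · simp only [List.length_append, List.length_cons, List.length_nil] at h3 ⊢
          push_cast at h3 ⊢; omega
        · intro i hi
          simp only [List.length_append, List.length_cons, List.length_nil] at hi ⊢
          by_cases hil : i < tl.length
          · rw [List.getElem_append_left hil]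
            have hmem : tl[i] ∈ o :: tl := List.mem_cons_of_mem o (List.getElem_mem hil)
            have hne : tl[i] ≠ d := fun e => hd (e ▸ hmem)
            rw [PySem.Dict.get?_insert_of_ne _ _ hne]
            have h4' := h4 (i + 1) (by simp; omega)
            simp only [List.getElem_cons_succ, List.length_cons] at h4'
            rw [h4']
            congr 1
            push_cast; omega
          · have hie : i = tl.length := by omega
            subst hie
            rw [List.getElem_concat_length rfl, PySem.Dict.get?_insert_self]
            congr 1
            push_cast; omega
        · intro x r hx hg
          have hxd : x ≠ d := fun e => hx (by simp [e])
          rw [PySem.Dict.get?_insert_of_ne _ _ hxd] at hg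
          by_cases hxo : x = o
          · subst hxo
            have h40 := h4 0 (by simp)
            simp only [List.getElem_cons_zero, List.length_cons] at h40
            rw [h40] at hg
            have hv := Option.some.inj hg
            push_cast at hv htrim
            omega
          · have hxtl : x ∉ tl := fun e => hx (List.mem_append_left _ e)
            have hxmem : x ∉ o :: tl := by simp [List.mem_cons, hxo, hxtl]
            have := h5 x r hxmem hg
            omega
    · -- eat, no trim
      have hA : aTrim K (order ++ [d], prev.modify d 0 (· + 1), res + 1)
          = (order ++ [d], prev.modify d 0 (· + 1), res + 1) := by
        refine aTrim_of_le K _ ?_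
        simp only [List.length_append, List.length_cons, List.length_nil]
        push_cast; omega
      rw [hA]
      dsimp only
      refine ⟨rfl, ?_, ?_, ?_, ?_, ?_⟩
      · intro x
        rw [PySem.Dict.getD_modify]
        by_cases hx : x = d
        · subst hx; simp [hprevd]
        · simp [hx, h1 x, List.mem_append]
      · simp only [List.nodup_append, h2, List.nodup_cons, List.not_mem_nil,
          not_false_eq_true, List.nodup_nil, and_self, true_and]
        intro a ha b hb
        simp only [List.mem_singleton] at hb
        subst hb
        exact fun e => hd (e ▸ ha)
      · simp only [List.length_append, List.length_cons, List.length_nil]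
        push_cast; omega
      · intro i hi
        simp only [List.length_append, List.length_cons, List.length_nil] at hi ⊢
        by_cases hil : i < order.length
        · rw [List.getElem_append_left hil]
          have hne : order[i] ≠ d := fun e => hd (e ▸ List.getElem_mem hil)
          rw [PySem.Dict.get?_insert_of_ne _ _ hne, h4 i hil]
          congr 1
          push_cast; omega
        · have hie : i = order.length := by omega
          subst hie
          rw [List.getElem_concat_length rfl, PySem.Dict.get?_insert_self]
          congr 1
          push_cast; omega
      · intro x r hx hg
        have hxd : x ≠ d := fun e => hx (by simp [e])
        rw [PySem.Dict.get?_insert_of_ne _ _ hxd] at hg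
        have := h5 x r (fun e => hx (List.mem_append_left _ e)) hg
        omega

lemma fold_eq (K : Int) (D : List Int) : ∀ (order : List Int) (prev : PySem.Dict Int Int)
    (res : Int) (last : PySem.Dict Int Int), WinInv K order prev res last →
    (D.foldl (aStep K) (order, prev, res)).2.2 = (D.foldl (bStep K) (last, res)).2 := by
  induction D with
  | nil => intro _ _ _ _ _; rfl
  | cons d D ih =>
    intro order prev res last h
    have hs := step_inv K d order prev res last h
    simp only [List.foldl_cons]
    have e1 : aStep K (order, prev, res) d
        = ((aStep K (order, prev, res) d).1, (aStep K (order, prev, res) d).2.1,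
           (aStep K (order, prev, res) d).2.2) := rfl
    have e2 : bStep K (last, res) d
        = ((bStep K (last, res) d).1, (bStep K (last, res) d).2) := rfl
    rw [e1, e2, hs.1]
    exact ih _ _ _ _ hs.2

lemma inv_init (K : Int) : WinInv K [] PySem.Dict.empty 0 PySem.Dict.empty := by
  refine ⟨?_, by simp, by simp [le_max_right], by simp, ?_⟩
  · intro x; simp [PySem.Dict.getD_empty]
  · intro x r _ hx; simp [PySem.Dict.get?_empty] at hx

-- ===== VERDICT (by name: the statement is the Claim_ definition above) =====
theorem getMaximumEatenDishCount_spec : Claim_equal_getMaximumEatenDishCount := by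
  intro N D K _
  unfold Spec_getMaximumEatenDishCount getMaximumEatenDishCount getMaximumEatenDishCount_alt
  exact fold_eq K D [] PySem.Dict.empty 0 PySem.Dict.empty (inv_init K)
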